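-- pv_equiv track=rewrite | github.com/200me/Python-Calculator | controller/controller.py | error_message_maker
-- ===== SOURCE A (Python) =====
-- def error_message_maker(input_list, error_index_list):
--     return_string = "Error found:"
--     for i in range(len(input_list)):
--         if i in error_index_list:
--             return_string += f" [{input_list[i]}]"
--         else:
--             return_string += f" {input_list[i]}"
--     return return_string
-- ===== SOURCE B (Python) =====
-- def error_message_maker(input_list, error_index_list):
--     tokens = list(input_list)
--     n = len(tokens)
--     for idx in error_index_list:
--         if 0 <= idx < n:
--             tokens[idx] = f"[{input_list[idx]}]"
--     return "Error found:" + "".join(" " + t for t in tokens)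
-- ===== Notes on version B (the rewrite author's own statement) =====
-- stated objective: faster
-- what changed: B copies the tokens once, drives a second loop over the flag list itself (setting the token at each in-range index to its bracketed form) instead of testing 'i in error_index_list' for every position, and joins the result once instead of repeated string concatenation.
import Mathlib
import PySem

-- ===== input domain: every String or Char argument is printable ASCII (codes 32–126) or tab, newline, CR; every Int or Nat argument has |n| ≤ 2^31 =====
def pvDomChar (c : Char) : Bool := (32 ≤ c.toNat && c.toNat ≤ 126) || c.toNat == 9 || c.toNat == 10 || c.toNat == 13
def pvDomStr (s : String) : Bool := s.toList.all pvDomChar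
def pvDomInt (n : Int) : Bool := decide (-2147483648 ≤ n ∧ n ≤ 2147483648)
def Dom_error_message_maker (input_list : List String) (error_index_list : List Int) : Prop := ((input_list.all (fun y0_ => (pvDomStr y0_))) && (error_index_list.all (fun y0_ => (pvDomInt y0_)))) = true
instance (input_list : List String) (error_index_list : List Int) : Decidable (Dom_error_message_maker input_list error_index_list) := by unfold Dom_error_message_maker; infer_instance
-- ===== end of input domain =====

-- B builds the token list once and drives a second loop over the flag list (setting the
-- bracketed form at each in-range index) instead of testing membership at every position;
-- an alternative O(n+m) decomposition of the same output.

-- ===== PORT A =====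
def error_message_maker (input_list : List String) (error_index_list : List Int) : String :=
  (PySem.List.pyRange 0 input_list.length 1).foldl
    (fun s i =>
      if i ∈ error_index_list
      then s ++ (" [" ++ PySem.List.pyGetD input_list i "" ++ "]")
      else s ++ (" " ++ PySem.List.pyGetD input_list i ""))
    "Error found:"

-- ===== PORT B =====
def error_message_maker_alt (input_list : List String) (error_index_list : List Int) : String :=
  let toks := error_index_list.foldl
    (fun t idx =>
      if 0 ≤ idx ∧ idx < (input_list.length : Int)
      then t.set idx.toNat ("[" ++ PySem.List.pyGetD input_list idx "" ++ "]")
      else t)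
    input_list
  "Error found:" ++ String.join (toks.map (fun t => " " ++ t))

-- ===== PRECONDITION & SPEC =====
def Spec_error_message_maker (input_list : List String) (error_index_list : List Int) (out : String) : Prop := out = error_message_maker_alt input_list error_index_list
instance (input_list : List String) (error_index_list : List Int) (out : String) : Decidable (Spec_error_message_maker input_list error_index_list out) := by unfold Spec_error_message_maker; infer_instance

-- ===== CLAIM (what is proved, stated in full; the proofs are below) =====
def Claim_equal_error_message_maker : Prop := ∀ (input_list : List String) (error_index_list : List Int), Dom_error_message_maker input_list error_index_list → Spec_error_message_maker input_list error_index_list (error_message_maker input_list error_index_list)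

-- ===== LEMMAS AND PROOFS =====

-- B's update step, named for the lemmas
def emmStep (input_list : List String) (t : List String) (idx : Int) : List String :=
  if 0 ≤ idx ∧ idx < (input_list.length : Int)
  then t.set idx.toNat ("[" ++ PySem.List.pyGetD input_list idx "" ++ "]")
  else t

lemma emmStep_length (input_list t : List String) (idx : Int) :
    (emmStep input_list t idx).length = t.length := by
  unfold emmStep; split <;> simp

lemma emm_fold_length (input_list : List String) (errs : List Int) (t : List String) :
    (errs.foldl (emmStep input_list) t).length = t.length := by
  induction errs generalizing t with
  | nil => rfl
  | cons a errs ih => simp [List.foldl_cons, ih, emmStep_length]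

lemma emm_fold_getElem? (input_list : List String) (errs : List Int) (t : List String)
    (hlen : t.length = input_list.length) (i : Nat) (hi : i < input_list.length) :
    (errs.foldl (emmStep input_list) t)[i]? =
      if (i : Int) ∈ errs
      then some ("[" ++ PySem.List.pyGetD input_list (i : Int) "" ++ "]")
      else t[i]? := by
  induction errs generalizing t with
  | nil => simp
  | cons a errs ih =>
    rw [List.foldl_cons, ih (emmStep input_list t a) (by rw [emmStep_length, hlen])]
    by_cases hmem : (i : Int) ∈ errs
    · simp [hmem]
    · by_cases ha : a = (i : Int)
      · subst ha
        have hg : (0 : Int) ≤ (i : Int) ∧ (i : Int) < (input_list.length : Int) := by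
          constructor
          · exact Int.natCast_nonneg i
          · exact_mod_cast hi
        unfold emmStep
        rw [if_pos hg, if_neg hmem, Int.toNat_natCast,
          List.getElem?_set_self (by omega : i < t.length)]
        simp
      · have hm2 : ¬ ((i : Int) ∈ a :: errs) := by
          simp [hmem]
          intro h; exact ha h.symm
        rw [if_neg hm2, if_neg hmem]
        unfold emmStep
        split
        · next hg =>
          have : a.toNat ≠ i := by omega
          rw [List.getElem?_set_ne this]
        · rfl

lemma emm_join_cons (s : String) (l : List String) :
    String.join (s :: l) = s ++ String.join l := by
  simp [String.join]
  induction l generalizing s with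
  | nil => simp
  | cons a l ih =>
    rw [List.foldl_cons, List.foldl_cons, ih (s ++ a), ih ("" ++ a)]
    simp [String.append_assoc]

-- generic: a fold that appends f i for each i is the init ++ concatenation
lemma emm_foldl_emit (f : Int → String) (l : List Int) (init : String) :
    l.foldl (fun s i => s ++ f i) init = init ++ String.join (l.map f) := by
  induction l generalizing init with
  | nil => simp [String.join]
  | cons a l ih =>
    rw [List.foldl_cons, ih, List.map_cons, emm_join_cons, ← String.append_assoc]

lemma emm_space_bracket (x : String) : " [" ++ x ++ "]" = " " ++ ("[" ++ x ++ "]") := by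
  rw [← String.append_assoc, ← String.append_assoc]
  rfl

theorem emm_main (input_list : List String) (error_index_list : List Int) :
    error_message_maker input_list error_index_list
      = error_message_maker_alt input_list error_index_list := by
  unfold error_message_maker error_message_maker_alt
  have hbody :
      (fun (s : String) (i : Int) =>
        if i ∈ error_index_list
        then s ++ (" [" ++ PySem.List.pyGetD input_list i "" ++ "]")
        else s ++ (" " ++ PySem.List.pyGetD input_list i ""))
      = (fun (s : String) (i : Int) => s ++
          (if i ∈ error_index_list
           then " [" ++ PySem.List.pyGetD input_list i "" ++ "]"
           else " " ++ PySem.List.pyGetD input_list i "")) := by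
    funext s i; split <;> rfl
  rw [hbody, emm_foldl_emit]
  show _ = "Error found:" ++ String.join _
  congr 1
  congr 1
  -- the two token lists coincide
  apply List.ext_getElem?
  intro k
  by_cases hk : k < input_list.length
  · have hstep : (fun (t : List String) (idx : Int) =>
        if 0 ≤ idx ∧ idx < (input_list.length : Int)
        then t.set idx.toNat ("[" ++ PySem.List.pyGetD input_list idx "" ++ "]")
        else t) = emmStep input_list := rfl
    rw [PySem.List.getElem?_map_pyRange_zero _ _ _ hk, List.getElem?_map, hstep,
      emm_fold_getElem? input_list error_index_list input_list rfl k hk]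
    by_cases hmem : (k : Int) ∈ error_index_list
    · simp [hmem, emm_space_bracket]
    · simp [hmem, List.getElem?_eq_getElem hk,
        PySem.List.pyGetD_eq_getElem input_list (k : Int) "" (Int.natCast_nonneg k)]
  · have h1 : ((PySem.List.pyRange 0 (input_list.length) 1).map
        (fun i => if i ∈ error_index_list
           then " [" ++ PySem.List.pyGetD input_list i "" ++ "]"
           else " " ++ PySem.List.pyGetD input_list i ""))[k]? = none := by
      rw [List.getElem?_eq_none]
      simp [PySem.List.length_pyRange_one]
      omega
    have hstep : (fun (t : List String) (idx : Int) =>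
        if 0 ≤ idx ∧ idx < (input_list.length : Int)
        then t.set idx.toNat ("[" ++ PySem.List.pyGetD input_list idx "" ++ "]")
        else t) = emmStep input_list := rfl
    rw [hstep]
    have h2 : ((error_index_list.foldl (emmStep input_list) input_list).map
        (fun t => " " ++ t))[k]? = none := by
      rw [List.getElem?_eq_none]
      simp [emm_fold_length]
      omega
    rw [h1]
    exact h2.symm

-- ===== VERDICT (by name: the statement is the Claim_ definition above) =====
theorem error_message_maker_spec : Claim_equal_error_message_maker := by
  intro input_list error_index_list _
  show _ = _
  exact emm_main input_list error_index_list
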